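-- pv_equiv track=rewrite | github.com/alexandraback/datacollection | solutions_5631989306621952_0/Python/dreloong/problem_a.py | winning_last_word
-- ===== SOURCE A (Python) =====
-- def winning_last_word(S):
--     lst = [S[0]]
--     for ch in S[1:]:
--         if ord(ch) < ord(lst[0]):
--             lst.append(ch)
--         else:
--             lst.insert(0, ch)
--     return ''.join(lst)
-- ===== SOURCE B (Python) =====
-- def winning_last_word(S):
--     # Characterization: a char goes to the front group iff it equals the
--     # prefix maximum at its position; front group appears reversed, rest in order.
--     m = S[0]
--     pmax = []
--     for ch in S:
--         if ch > m:
--             m = ch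
--         pmax.append(m)
--     front = [ch for ch, pm in zip(S, pmax) if ch == pm]
--     back = [ch for ch, pm in zip(S, pmax) if ch != pm]
--     return ''.join(reversed(front)) + ''.join(back)
-- ===== Notes on version B (the rewrite author's own statement) =====
-- stated objective: faster
-- what changed: B first computes the prefix-maximum array in a branch-free scan, then partitions characters by whether they equal their prefix maximum (those form the reversed front group), instead of A's single loop mutating one list at both ends with insert(0,.).
import Mathlib
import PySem

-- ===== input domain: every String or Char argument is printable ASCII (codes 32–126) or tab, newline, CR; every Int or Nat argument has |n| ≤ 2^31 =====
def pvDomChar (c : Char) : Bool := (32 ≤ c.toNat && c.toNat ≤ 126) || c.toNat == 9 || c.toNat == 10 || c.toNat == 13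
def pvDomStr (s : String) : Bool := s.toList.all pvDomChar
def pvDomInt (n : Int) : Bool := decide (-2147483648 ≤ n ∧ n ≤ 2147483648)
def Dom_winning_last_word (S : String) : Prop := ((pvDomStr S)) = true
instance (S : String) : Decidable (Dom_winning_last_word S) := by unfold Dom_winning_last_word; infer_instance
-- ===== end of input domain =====

-- B computes the prefix-maximum array in one scan and then partitions the
-- characters by 'equals its prefix maximum' (front group, reversed) vs not
-- (back group), replacing A's single list mutated at both ends (O(n^2) → O(n)).

-- ===== PORT A =====
-- A's loop: lst starts [S[0]]; smaller chars appended, others inserted at front.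
def wlwA_loop : List Char → List Char → List Char
  | lst, [] => lst
  | lst, ch :: rest =>
      if ch.toNat < (lst.headD ' ').toNat then wlwA_loop (lst ++ [ch]) rest
      else wlwA_loop (ch :: lst) rest

def winning_last_word (S : String) : String :=
  match S.toList with
  | [] => ""   -- Python raises IndexError here; excluded by Pre_
  | c :: rest => String.ofList (wlwA_loop [c] rest)

-- ===== PORT B =====
-- B step 1: the prefix-maximum array (m starts at S[0], scanned over all of S).
def wlwB_pmax : Char → List Char → List Char
  | _, [] => []
  | m, ch :: rest =>
      let m' := if m < ch then ch else m
      m' :: wlwB_pmax m' rest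

def winning_last_word_alt (S : String) : String :=
  match S.toList with
  | [] => ""   -- Python raises IndexError here; excluded by Pre_
  | c :: rest =>
      let l := c :: rest
      let pmax := wlwB_pmax c l
      let front := ((l.zip pmax).filter (fun p => p.1 == p.2)).map Prod.fst
      let back := ((l.zip pmax).filter (fun p => p.1 != p.2)).map Prod.fst
      String.ofList (front.reverse ++ back)

-- ===== PRECONDITION & SPEC =====
-- Pre_ excludes only the empty string, on which Python A (and B) raise IndexError.
def Pre_winning_last_word (S : String) : Prop := S ≠ ""
instance (S : String) : Decidable (Pre_winning_last_word S) := by unfold Pre_winning_last_word; infer_instance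
def pvWitness_winning_last_word : String := "ba"

def Spec_winning_last_word (S : String) (out : String) : Prop := out = winning_last_word_alt S
instance (S : String) (out : String) : Decidable (Spec_winning_last_word S out) := by unfold Spec_winning_last_word; infer_instance

-- ===== CLAIM =====
def Claim_equal_winning_last_word : Prop := ∀ (S : String), Dom_winning_last_word S → Pre_winning_last_word S → Spec_winning_last_word S (winning_last_word S)

-- ===== LEMMAS AND PROOFS =====
-- Proof-only intermediate: the front/back groups as one structural recursion,
-- carrying the running maximum cur.
def wlwAux : Char → List Char → List Char × List Char
  | _, [] => ([], [])
  | cur, ch :: rest =>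
      if cur ≤ ch then
        let p := wlwAux ch rest
        (ch :: p.1, p.2)
      else
        let p := wlwAux cur rest
        (p.1, ch :: p.2)

-- A's loop, started on reversed-front (cur::fr) ++ back bk, ends as
-- new front (reversed) ++ old front ++ old back ++ new back.
theorem wlwA_loop_eq (rest : List Char) : ∀ (cur : Char) (fr bk : List Char),
    wlwA_loop ((cur :: fr) ++ bk) rest =
      ((wlwAux cur rest).1.reverse ++ (cur :: fr)) ++ (bk ++ (wlwAux cur rest).2) := by
  induction rest with
  | nil => intro cur fr bk; simp [wlwA_loop, wlwAux]
  | cons ch rest ih =>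
      intro cur fr bk
      by_cases h : ch.toNat < cur.toNat
      · have h' : ¬ cur ≤ ch := by
          rw [Char.le_def]
          exact fun hle => absurd (UInt32.le_iff_toNat_le.mp hle) (Nat.not_le_of_lt h)
        simp only [wlwA_loop, List.cons_append, List.headD_cons, if_pos h, wlwAux, if_neg h']
        have e : fr ++ bk ++ [ch] = fr ++ (bk ++ [ch]) := by simp
        rw [e]
        have := ih cur fr (bk ++ [ch])
        simp only [List.cons_append] at this
        rw [this]
        simp
      · have h' : cur ≤ ch := by
          rw [Char.le_def]; exact UInt32.le_iff_toNat_le.mpr (Nat.le_of_not_lt h)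
        simp only [wlwA_loop, List.cons_append, List.headD_cons, if_neg h, wlwAux, if_pos h']
        have := ih ch (cur :: fr) bk
        simp only [List.cons_append] at this ⊢
        rw [this]
        simp
  
-- B's staged passes (prefix maxima, then the two filters) compute exactly
-- the front and back groups of wlwAux.
theorem wlwB_filters_eq (l : List Char) : ∀ (m : Char),
    (((l.zip (wlwB_pmax m l)).filter (fun p => p.1 == p.2)).map Prod.fst = (wlwAux m l).1) ∧
    (((l.zip (wlwB_pmax m l)).filter (fun p => p.1 != p.2)).map Prod.fst = (wlwAux m l).2) := by
  induction l with
  | nil => intro m; simp [wlwB_pmax, wlwAux]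
  | cons c r ih =>
      intro m
      by_cases hlt : m < c
      · have hle : m ≤ c := le_of_lt hlt
        have hne : (c == c) = true := by simp
        simp only [wlwB_pmax, if_pos hlt, List.zip_cons_cons, List.filter_cons, wlwAux,
          if_pos hle]
        simpa [hne] using ih c
      · by_cases heq : c = m
        · subst heq
          have hle : c ≤ c := le_refl c
          simp only [wlwB_pmax, if_neg hlt, List.zip_cons_cons, List.filter_cons, wlwAux,
            if_pos hle]
          simpa using ih c
        · have hnle : ¬ m ≤ c := by
            intro hle
            rcases lt_or_eq_of_le hle with h | h
            · exact hlt h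
            · exact heq h.symm
          have hb : (c == m) = false := by simp [heq]
          simp only [wlwB_pmax, if_neg hlt, List.zip_cons_cons, List.filter_cons, wlwAux,
            if_neg hnle]
          simpa [hb, heq] using ih m

-- ===== VERDICT =====
theorem winning_last_word_spec : Claim_equal_winning_last_word := by
  intro S _ hpre
  unfold Spec_winning_last_word winning_last_word winning_last_word_alt
  match hS : S.toList with
  | [] =>
      exact absurd (by simpa using congrArg String.ofList hS) hpre
  | c :: rest =>
      simp only
      have hA := wlwA_loop_eq rest c [] []
      have hpm : wlwB_pmax c (c :: rest) = c :: wlwB_pmax c rest := by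
        simp [wlwB_pmax]
      have hB := wlwB_filters_eq rest c
      simp only [List.append_nil, List.nil_append] at hA
      rw [hA, hpm]
      simp only [List.zip_cons_cons, List.filter_cons, beq_self_eq_true, if_pos, bne_self_eq_false]
      simp [hB.1, hB.2]
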